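-- pv_equiv track=rewrite | github.com/arstriker/farming-biodiversity | app.py | get_crop_category
-- ===== SOURCE A (Python) =====
-- CROP_CATEGORIES = {
--     "vegetables": {
--         "name": "Vegetables",
--         "icon": "fas fa-carrot",
--         "color": "#22c55e",
--         "crops": ["tomato", "potato", "onion", "carrot", "lettuce", "cucumber", "pepper", "broccoli", "spinach", "cabbage"]
--     },
--     "fruits": {
--         "name": "Fruits",
--         "icon": "fas fa-apple-alt",
--         "color": "#f59e0b",
--         "crops": ["apple", "orange", "banana", "strawberry", "grape", "peach", "pear", "cherry", "plum", "blueberry"]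
--     },
--     "grains": {
--         "name": "Grains",
--         "icon": "fas fa-seedling",
--         "color": "#8b5cf6",
--         "crops": ["rice", "wheat", "corn", "barley", "oats", "quinoa", "millet", "sorghum", "rye", "buckwheat"]
--     },
--     "herbs": {
--         "name": "Herbs",
--         "icon": "fas fa-leaf",
--         "color": "#10b981",
--         "crops": ["basil", "mint", "cilantro", "parsley", "oregano", "thyme", "rosemary", "sage", "dill", "chives"]
--     },
--     "legumes": {
--         "name": "Legumes",
--         "icon": "fas fa-circle",
--         "color": "#ef4444",
--         "crops": ["beans", "peas", "lentils", "chickpeas", "soybeans", "peanuts", "alfalfa", "clover"]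
--     }
-- }
--
-- def get_crop_category(crop_name):
--     """Get the category information for a given crop."""
--     crop_lower = crop_name.lower()
--     for category_key, category_data in CROP_CATEGORIES.items():
--         if crop_lower in category_data["crops"]:
--             return {
--                 "key": category_key,
--                 "name": category_data["name"],
--                 "icon": category_data["icon"],
--                 "color": category_data["color"]
--             }
--     return {
--         "key": "custom",
--         "name": "Custom",
--         "icon": "fas fa-question-circle",
--         "color": "#6b7280"
--     }
-- ===== SOURCE B (Python) =====
-- # Compact data table; a flat crop -> info dict is built once at import time,
-- # so each call is a single dict lookup instead of a scan over category lists.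
-- _TABLE = [
--     ("vegetables", "Vegetables", "fas fa-carrot", "#22c55e",
--      "tomato potato onion carrot lettuce cucumber pepper broccoli spinach cabbage"),
--     ("fruits", "Fruits", "fas fa-apple-alt", "#f59e0b",
--      "apple orange banana strawberry grape peach pear cherry plum blueberry"),
--     ("grains", "Grains", "fas fa-seedling", "#8b5cf6",
--      "rice wheat corn barley oats quinoa millet sorghum rye buckwheat"),
--     ("herbs", "Herbs", "fas fa-leaf", "#10b981",
--      "basil mint cilantro parsley oregano thyme rosemary sage dill chives"),
--     ("legumes", "Legumes", "fas fa-circle", "#ef4444",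
--      "beans peas lentils chickpeas soybeans peanuts alfalfa clover"),
-- ]
--
-- _FLAT = {
--     crop: {"key": key, "name": name, "icon": icon, "color": color}
--     for key, name, icon, color, crops in _TABLE
--     for crop in crops.split()
-- }
--
-- _CUSTOM = {"key": "custom", "name": "Custom", "icon": "fas fa-question-circle", "color": "#6b7280"}
--
-- def get_crop_category(crop_name):
--     """Get the category information for a given crop."""
--     return dict(_FLAT.get(crop_name.lower(), _CUSTOM))
-- ===== Notes on version B (the rewrite author's own statement) =====
-- stated objective: idiomatic
-- what changed: A scans each category's crop list on every call; B restructures the data into a compact table, builds a flat crop-to-info dict once at import time, and answers each call with a single dict lookup with the custom fallback as default.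
import Mathlib
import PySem

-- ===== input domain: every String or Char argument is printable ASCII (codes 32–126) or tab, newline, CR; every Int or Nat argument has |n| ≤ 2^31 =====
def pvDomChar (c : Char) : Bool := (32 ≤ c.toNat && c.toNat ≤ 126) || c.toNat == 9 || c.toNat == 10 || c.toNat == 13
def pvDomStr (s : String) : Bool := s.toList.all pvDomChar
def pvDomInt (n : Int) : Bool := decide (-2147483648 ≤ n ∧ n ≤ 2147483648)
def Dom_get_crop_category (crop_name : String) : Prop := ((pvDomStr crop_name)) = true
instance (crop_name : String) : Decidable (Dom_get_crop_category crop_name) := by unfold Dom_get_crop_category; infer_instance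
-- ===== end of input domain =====

-- B replaces A's per-call scan over the category crop lists by a flat crop->info dict
-- built once from a compact table (idiomatic; same return value everywhere).


-- ===== PORT A =====

structure CatData where
  name : String
  icon : String
  color : String
  crops : List String
deriving DecidableEq, Repr

def CROP_CATEGORIES : List (String × CatData) :=
  [ ("vegetables", ⟨"Vegetables", "fas fa-carrot", "#22c55e",
      ["tomato", "potato", "onion", "carrot", "lettuce", "cucumber", "pepper", "broccoli", "spinach", "cabbage"]⟩),
    ("fruits", ⟨"Fruits", "fas fa-apple-alt", "#f59e0b",
      ["apple", "orange", "banana", "strawberry", "grape", "peach", "pear", "cherry", "plum", "blueberry"]⟩),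
    ("grains", ⟨"Grains", "fas fa-seedling", "#8b5cf6",
      ["rice", "wheat", "corn", "barley", "oats", "quinoa", "millet", "sorghum", "rye", "buckwheat"]⟩),
    ("herbs", ⟨"Herbs", "fas fa-leaf", "#10b981",
      ["basil", "mint", "cilantro", "parsley", "oregano", "thyme", "rosemary", "sage", "dill", "chives"]⟩),
    ("legumes", ⟨"Legumes", "fas fa-circle", "#ef4444",
      ["beans", "peas", "lentils", "chickpeas", "soybeans", "peanuts", "alfalfa", "clover"]⟩) ]

-- the dict literal A returns from inside the loop
def catInfo (k : String) (d : CatData) : List (String × String) :=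
  [("key", k), ("name", d.name), ("icon", d.icon), ("color", d.color)]

def customInfo : List (String × String) :=
  [("key", "custom"), ("name", "Custom"), ("icon", "fas fa-question-circle"), ("color", "#6b7280")]

-- A's for-loop over CROP_CATEGORIES.items() with early return
def catLoop (crop_lower : String) : List (String × CatData) → List (String × String)
  | [] => customInfo
  | (category_key, category_data) :: rest =>
      if category_data.crops.contains crop_lower then catInfo category_key category_data
      else catLoop crop_lower rest

def get_crop_category (crop_name : String) : List (String × String) :=
  let crop_lower := PySem.Str.lower crop_name
  catLoop crop_lower CROP_CATEGORIES

-- ===== PORT B =====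

-- _TABLE of Source B: (key, name, icon, color, space-joined crop names)
def pvTable : List (String × String × String × String × String) :=
  [ ("vegetables", "Vegetables", "fas fa-carrot", "#22c55e",
      "tomato potato onion carrot lettuce cucumber pepper broccoli spinach cabbage"),
    ("fruits", "Fruits", "fas fa-apple-alt", "#f59e0b",
      "apple orange banana strawberry grape peach pear cherry plum blueberry"),
    ("grains", "Grains", "fas fa-seedling", "#8b5cf6",
      "rice wheat corn barley oats quinoa millet sorghum rye buckwheat"),
    ("herbs", "Herbs", "fas fa-leaf", "#10b981",
      "basil mint cilantro parsley oregano thyme rosemary sage dill chives"),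
    ("legumes", "Legumes", "fas fa-circle", "#ef4444",
      "beans peas lentils chickpeas soybeans peanuts alfalfa clover") ]

-- _FLAT of Source B: the dict comprehension over the table, crops.split()
def pvFlat : PySem.Dict String (List (String × String)) :=
  pvTable.foldl
    (fun d row =>
      (PySem.Str.split₀ row.2.2.2.2).foldl
        (fun d crop =>
          d.insert crop
            [("key", row.1), ("name", row.2.1), ("icon", row.2.2.1), ("color", row.2.2.2.1)])
        d)
    PySem.Dict.empty

def pvCustom : List (String × String) :=
  [("key", "custom"), ("name", "Custom"), ("icon", "fas fa-question-circle"), ("color", "#6b7280")]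

def get_crop_category_alt (crop_name : String) : List (String × String) :=
  pvFlat.getD (PySem.Str.lower crop_name) pvCustom

-- ===== PRECONDITION & SPEC =====
def Spec_get_crop_category (crop_name : String) (out : List (String × String)) : Prop := out = get_crop_category_alt crop_name
instance (crop_name : String) (out : List (String × String)) : Decidable (Spec_get_crop_category crop_name out) := by unfold Spec_get_crop_category; infer_instance

-- ===== CLAIM (what is proved, stated in full; the proofs are below) =====
def Claim_equal_get_crop_category : Prop := ∀ (crop_name : String), Dom_get_crop_category crop_name → Spec_get_crop_category crop_name (get_crop_category crop_name)

-- ===== LEMMAS AND PROOFS =====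

set_option maxRecDepth 8192

-- the five crops.split() results, evaluated once
lemma split_row1 : PySem.Str.split₀ "tomato potato onion carrot lettuce cucumber pepper broccoli spinach cabbage" = ["tomato", "potato", "onion", "carrot", "lettuce", "cucumber", "pepper", "broccoli", "spinach", "cabbage"] := by decide
lemma split_row2 : PySem.Str.split₀ "apple orange banana strawberry grape peach pear cherry plum blueberry" = ["apple", "orange", "banana", "strawberry", "grape", "peach", "pear", "cherry", "plum", "blueberry"] := by decide
lemma split_row3 : PySem.Str.split₀ "rice wheat corn barley oats quinoa millet sorghum rye buckwheat" = ["rice", "wheat", "corn", "barley", "oats", "quinoa", "millet", "sorghum", "rye", "buckwheat"] := by decide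
lemma split_row4 : PySem.Str.split₀ "basil mint cilantro parsley oregano thyme rosemary sage dill chives" = ["basil", "mint", "cilantro", "parsley", "oregano", "thyme", "rosemary", "sage", "dill", "chives"] := by decide
lemma split_row5 : PySem.Str.split₀ "beans peas lentils chickpeas soybeans peanuts alfalfa clover" = ["beans", "peas", "lentils", "chickpeas", "soybeans", "peanuts", "alfalfa", "clover"] := by decide

-- B's flat dict equals the same dict built directly over A's category structure
lemma pvFlat_eq_build : pvFlat =
    CROP_CATEGORIES.foldl
      (fun d kd => kd.2.crops.foldl (fun d crop => d.insert crop (catInfo kd.1 kd.2)) d)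
      PySem.Dict.empty := by
  unfold pvFlat
  simp only [pvTable, CROP_CATEGORIES, List.foldl_cons, List.foldl_nil,
    split_row1, split_row2, split_row3, split_row4, split_row5, catInfo]

-- inserting every crop of one list with the same value: lookup afterwards
lemma getD_foldl_insert_const (crops : List String) (v : List (String × String))
    (d : PySem.Dict String (List (String × String))) (t : String) (fb : List (String × String)) :
    (crops.foldl (fun a c => a.insert c v) d).getD t fb
      = if crops.contains t then v else d.getD t fb := by
  induction crops generalizing d with
  | nil => simp
  | cons c cs ih =>
      simp only [List.foldl_cons, ih, List.contains_cons]
      by_cases h : t = c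
      · subst h
        by_cases hcs : t ∈ cs <;> simp [hcs]
      · simp [PySem.Dict.getD_insert, h]

lemma contains_foldl_insert_const (crops : List String) (v : List (String × String))
    (d : PySem.Dict String (List (String × String))) (t : String) :
    (crops.foldl (fun a c => a.insert c v) d).contains t
      = (d.contains t || crops.contains t) := by
  induction crops generalizing d with
  | nil => simp
  | cons c cs ih =>
      simp only [List.foldl_cons, ih, List.contains_cons, PySem.Dict.contains_insert]
      cases t == c <;> cases d.contains t <;> simp

-- building the flat index over a category list whose crops are fresh and pairwise disjoint
-- agrees with A's first-match loop
lemma getD_buildIndex (cats : List (String × CatData))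
    (d : PySem.Dict String (List (String × String))) (t : String)
    (h1 : ∀ kd ∈ cats, ∀ c ∈ kd.2.crops, d.contains c = false)
    (h2 : List.Pairwise (fun p q : String × CatData => ∀ c ∈ p.2.crops, c ∉ q.2.crops) cats) :
    (cats.foldl (fun d kd => kd.2.crops.foldl (fun d crop => d.insert crop (catInfo kd.1 kd.2)) d) d).getD t customInfo
      = if d.contains t then d.getD t customInfo else catLoop t cats := by
  induction cats generalizing d with
  | nil =>
      simp only [List.foldl_nil, catLoop]
      by_cases h : d.contains t = true
      · rw [if_pos h]
      · have hf : d.contains t = false := by simpa using h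
        rw [if_neg h, PySem.Dict.getD_of_not_contains d customInfo hf]
  | cons kd rest ih =>
      obtain ⟨k, cd⟩ := kd
      simp only [List.foldl_cons]
      rw [ih]
      · rw [contains_foldl_insert_const, getD_foldl_insert_const]
        simp only [catLoop]
        by_cases hm : t ∈ cd.crops
        · have hd : d.contains t = false := h1 (k, cd) (by simp) t hm
          simp [hm, hd]
        · simp [hm]
      · intro kd' hkd' c hc
        rw [contains_foldl_insert_const]
        have hfresh := h1 kd' (List.mem_cons_of_mem _ hkd') c hc
        have hdisj : c ∉ cd.crops := fun hcd => (List.pairwise_cons.mp h2).1 kd' hkd' c hcd hc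
        simp [hfresh, hdisj]
      · exact (List.pairwise_cons.mp h2).2

-- the concrete data: crops of distinct categories are disjoint
lemma crops_pairwise_disjoint :
    List.Pairwise (fun p q : String × CatData => ∀ c ∈ p.2.crops, c ∉ q.2.crops) CROP_CATEGORIES := by
  decide

-- ===== VERDICT (by name: the statement is the Claim_ definition above) =====
theorem get_crop_category_spec : Claim_equal_get_crop_category := by
  intro crop_name _
  unfold Spec_get_crop_category get_crop_category get_crop_category_alt
  show catLoop (PySem.Str.lower crop_name) CROP_CATEGORIES
      = pvFlat.getD (PySem.Str.lower crop_name) customInfo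
  rw [pvFlat_eq_build, getD_buildIndex _ _ _ (by simp) crops_pairwise_disjoint]
  simp
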